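-- pv_equiv track=rewrite | github.com/benz3927/Python_Projects | Political_Analyzer/Leo version.py | get_indicators
-- ===== SOURCE A (Python) =====
-- republican_indicators = ["Democrats", "Democrat", "Joe", "Biden", "Obama", "Barack", "Sleepy"]
--
-- democrat_indicators = ["Republican", "Republicans", "Trump", "Donald", "Mitt", "Romney"]
--
-- def get_indicators(text):
--     indicators = {}
--     indicators["republican"] = 0
--     indicators["democrat"] = 0
--     for word in text:
--         if word in republican_indicators:
--             indicators["republican"] += 1
--         elif word in democrat_indicators:
--             indicators["democrat"] += 1
--         else:
--             continue
--     return indicators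
-- ===== SOURCE B (Python) =====
-- republican_indicators = ["Democrats", "Democrat", "Joe", "Biden", "Obama", "Barack", "Sleepy"]
--
-- democrat_indicators = ["Republican", "Republicans", "Trump", "Donald", "Mitt", "Romney"]
--
-- def get_indicators(text):
--     # Inverted traversal: instead of scanning the text and classifying each word,
--     # loop over the (duplicate-free) indicator words and count occurrences of each
--     # in the text with list.count. Exact because each word matches at most one
--     # indicator (the lists are disjoint and duplicate-free).
--     indicators = {"republican": 0, "democrat": 0}
--     for w in republican_indicators:
--         indicators["republican"] += text.count(w)
--     for w in democrat_indicators: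
--         indicators["democrat"] += text.count(w)
--     return indicators
-- ===== Notes on version B (the rewrite author's own statement) =====
-- stated objective: alternative
-- what changed: Inverts the traversal: instead of one pass over the text classifying each word via if/elif list membership, B loops over the fixed indicator words and sums text.count(w) occurrence counts per party; exact because the indicator lists are disjoint and duplicate-free.
import Mathlib
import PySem

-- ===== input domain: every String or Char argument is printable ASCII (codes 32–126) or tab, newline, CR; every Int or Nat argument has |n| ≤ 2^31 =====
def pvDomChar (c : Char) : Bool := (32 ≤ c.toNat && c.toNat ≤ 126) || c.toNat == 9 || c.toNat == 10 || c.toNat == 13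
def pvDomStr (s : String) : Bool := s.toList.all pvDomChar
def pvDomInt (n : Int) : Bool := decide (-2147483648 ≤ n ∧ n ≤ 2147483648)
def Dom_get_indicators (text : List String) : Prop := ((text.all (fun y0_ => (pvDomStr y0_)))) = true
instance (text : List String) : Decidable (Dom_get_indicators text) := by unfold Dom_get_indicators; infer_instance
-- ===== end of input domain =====

-- B inverts the traversal: it loops over the indicator words and sums text.count(w) per party,
-- instead of A's single pass over the text with an if/elif membership classification; objective: alternative.

def republican_indicators : List String :=
  ["Democrats", "Democrat", "Joe", "Biden", "Obama", "Barack", "Sleepy"]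

def democrat_indicators : List String :=
  ["Republican", "Republicans", "Trump", "Donald", "Mitt", "Romney"]

-- ===== PORT A =====
def get_indicators (text : List String) : List (String × Int) :=
  let indicators : PySem.Dict String Int := PySem.Dict.empty
  let indicators := indicators.insert "republican" 0
  let indicators := indicators.insert "democrat" 0
  let indicators := text.foldl (fun d word =>
    if word ∈ republican_indicators then
      d.insert "republican" (d.getD "republican" 0 + 1)
    else if word ∈ democrat_indicators then
      d.insert "democrat" (d.getD "democrat" 0 + 1)
    else d) indicators
  indicators.items

-- ===== PORT B =====
def get_indicators_alt (text : List String) : List (String × Int) :=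
  let indicators : PySem.Dict String Int := PySem.Dict.mk [("republican", 0), ("democrat", 0)]
  let indicators := republican_indicators.foldl (fun d w =>
    d.insert "republican" (d.getD "republican" 0 + (PySem.List.count text w : Int))) indicators
  let indicators := democrat_indicators.foldl (fun d w =>
    d.insert "democrat" (d.getD "democrat" 0 + (PySem.List.count text w : Int))) indicators
  indicators.items

-- ===== PRECONDITION & SPEC =====
def Spec_get_indicators (text : List String) (out : List (String × Int)) : Prop := out = get_indicators_alt text
instance (text : List String) (out : List (String × Int)) : Decidable (Spec_get_indicators text out) := by unfold Spec_get_indicators; infer_instance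

-- ===== CLAIM (what is proved, stated in full; the proofs are below) =====
def Claim_equal_get_indicators : Prop := ∀ (text : List String), Dom_get_indicators text → Spec_get_indicators text (get_indicators text)

-- ===== LEMMAS AND PROOFS =====

lemma disjoint_indicators (w : String) (h : w ∈ republican_indicators) :
    w ∉ democrat_indicators := by
  fin_cases h <;> decide

-- A's loop computes the two membership counts.
lemma loop_items (text : List String) : ∀ (r d : Int),
    (text.foldl (fun d word =>
      if word ∈ republican_indicators then
        d.insert "republican" (d.getD "republican" 0 + 1)
      else if word ∈ democrat_indicators then
        d.insert "democrat" (d.getD "democrat" 0 + 1)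
      else d) (PySem.Dict.mk [("republican", r), ("democrat", d)])).items
    = [("republican", r + (text.countP (fun w => decide (w ∈ republican_indicators)) : Int)),
       ("democrat", d + (text.countP (fun w => decide (w ∈ democrat_indicators)) : Int))] := by
  induction text with
  | nil => intro r d; simp
  | cons w t ih =>
    intro r d
    by_cases hr : w ∈ republican_indicators
    · have hd := disjoint_indicators w hr
      simp only [List.foldl_cons, if_pos hr,
        show (PySem.Dict.mk [("republican", r), ("democrat", d)]).insert "republican"
            ((PySem.Dict.mk [("republican", r), ("democrat", d)]).getD "republican" 0 + 1)
          = PySem.Dict.mk [("republican", r + 1), ("democrat", d)] by rfl]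
      rw [ih]
      simp [hr, hd]
      ring
    · by_cases hd : w ∈ democrat_indicators
      · simp only [List.foldl_cons, if_neg hr, if_pos hd,
          show (PySem.Dict.mk [("republican", r), ("democrat", d)]).insert "democrat"
              ((PySem.Dict.mk [("republican", r), ("democrat", d)]).getD "democrat" 0 + 1)
            = PySem.Dict.mk [("republican", r), ("democrat", d + 1)] by rfl]
        rw [ih]
        simp [hr, hd]
        ring
      · simp only [List.foldl_cons, if_neg hr, if_neg hd]
        rw [ih]
        simp [hr, hd]

-- B's first loop only touches the "republican" slot.
lemma foldB_rep (text : List String) : ∀ (ws : List String) (r d : Int),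
    (ws.foldl (fun dd w =>
      dd.insert "republican" (dd.getD "republican" 0 + (PySem.List.count text w : Int)))
      (PySem.Dict.mk [("republican", r), ("democrat", d)]))
    = PySem.Dict.mk [("republican", r + (ws.map (fun w => (PySem.List.count text w : Int))).sum),
                     ("democrat", d)] := by
  intro ws
  induction ws with
  | nil => intro r d; simp
  | cons w ws ih =>
    intro r d
    simp only [List.foldl_cons,
      show (PySem.Dict.mk [("republican", r), ("democrat", d)]).insert "republican"
          ((PySem.Dict.mk [("republican", r), ("democrat", d)]).getD "republican" 0
            + (PySem.List.count text w : Int))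
        = PySem.Dict.mk [("republican", r + PySem.List.count text w), ("democrat", d)] by rfl]
    rw [ih]
    simp [add_assoc]

-- B's second loop only touches the "democrat" slot.
lemma foldB_dem (text : List String) : ∀ (ws : List String) (r d : Int),
    (ws.foldl (fun dd w =>
      dd.insert "democrat" (dd.getD "democrat" 0 + (PySem.List.count text w : Int)))
      (PySem.Dict.mk [("republican", r), ("democrat", d)]))
    = PySem.Dict.mk [("republican", r),
                     ("democrat", d + (ws.map (fun w => (PySem.List.count text w : Int))).sum)] := by
  intro ws
  induction ws with
  | nil => intro r d; simp
  | cons w ws ih =>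
    intro r d
    simp only [List.foldl_cons,
      show (PySem.Dict.mk [("republican", r), ("democrat", d)]).insert "democrat"
          ((PySem.Dict.mk [("republican", r), ("democrat", d)]).getD "democrat" 0
            + (PySem.List.count text w : Int))
        = PySem.Dict.mk [("republican", r), ("democrat", d + PySem.List.count text w)] by rfl]
    rw [ih]
    simp [add_assoc]

-- Summing per-indicator occurrence counts equals the single membership count,
-- because the indicator list has no duplicates.
lemma ind_sum (x : String) : ∀ (L : List String),
    (L.map (fun w => (if w = x then (1 : Int) else 0))).sum = (L.count x : Int) := by
  intro L
  induction L with
  | nil => simp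
  | cons a L ih =>
    simp only [List.map_cons, List.sum_cons, ih, List.count_cons]
    push_cast
    by_cases h : a = x
    · simp [h]; ring
    · simp [h]

-- Summing per-indicator occurrence counts equals the single membership count,
-- because the indicator list has no duplicates.
lemma sum_count_eq_countP (L : List String) (hL : L.Nodup) (t : List String) :
    ((L.map (fun w => (t.count w : Int))).sum)
    = (t.countP (fun x => decide (x ∈ L)) : Int) := by
  induction t with
  | nil => simp
  | cons x t ih =>
    have hcnt : L.count x = if x ∈ L then 1 else 0 := by
      by_cases h : x ∈ L
      · simp [h, List.count_eq_one_of_mem hL h]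
      · simp [h, List.count_eq_zero_of_not_mem h]
    have hsplit :
        (L.map (fun w => ((x :: t).count w : Int))).sum
          = (L.map (fun w => (t.count w : Int))).sum
            + (L.map (fun w => (if w = x then (1 : Int) else 0))).sum := by
      rw [← List.sum_map_add]
      congr 1
      apply List.map_congr_left
      intro w _
      by_cases hwx : w = x
      · simp [hwx]
      · simp [hwx, Ne.symm hwx]
    rw [hsplit, ih, ind_sum, hcnt]
    by_cases h : x ∈ L
    · simp [h]
    · simp [h]

-- ===== VERDICT (by name: the statement is the Claim_ definition above) =====
theorem get_indicators_spec : Claim_equal_get_indicators := by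
  intro text _
  show get_indicators text = get_indicators_alt text
  show (text.foldl (fun d word =>
      if word ∈ republican_indicators then
        d.insert "republican" (d.getD "republican" 0 + 1)
      else if word ∈ democrat_indicators then
        d.insert "democrat" (d.getD "democrat" 0 + 1)
      else d) (PySem.Dict.mk [("republican", 0), ("democrat", 0)])).items
    = ((democrat_indicators.foldl (fun d w =>
        d.insert "democrat" (d.getD "democrat" 0 + (PySem.List.count text w : Int)))
        (republican_indicators.foldl (fun d w =>
          d.insert "republican" (d.getD "republican" 0 + (PySem.List.count text w : Int)))
          (PySem.Dict.mk [("republican", 0), ("democrat", 0)])))).items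
  rw [loop_items, foldB_rep, foldB_dem]
  have hc : ∀ w, (PySem.List.count text w : Int) = (text.count w : Int) := by
    intro w; rw [PySem.List.count_eq]
  simp only [hc,
    sum_count_eq_countP republican_indicators (by decide) text,
    sum_count_eq_countP democrat_indicators (by decide) text]
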